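-- pv_equiv track=rewrite | github.com/Giedrius-Kristinaitis/Crypt_Kicker | cypher.py | verify_letter_positions
-- ===== SOURCE A (Python) =====
-- def verify_letter_positions(line: str, letter: str, positions: [int]) -> bool:
--     correct_position_count = 0
--
--     for position, char in enumerate(line):
--         if char == letter and position not in positions:
--             return False
--
--         if char == letter:
--             correct_position_count += 1
--
--     return correct_position_count == len(positions)
-- ===== SOURCE B (Python) =====
-- def verify_letter_positions(line: str, letter: str, positions: [int]) -> bool:
--     occurrences = [i for i, c in enumerate(line) if c == letter]
--     return occurrences == sorted(positions)
-- ===== Notes on version B (the rewrite author's own statement) =====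
-- stated objective: alternative
-- what changed: Replaces A's stateful early-return scan with per-character membership tests in positions by a sort-then-compare algorithm: collect the (ascending) occurrence indices and compare the list against sorted(positions).
import Mathlib
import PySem

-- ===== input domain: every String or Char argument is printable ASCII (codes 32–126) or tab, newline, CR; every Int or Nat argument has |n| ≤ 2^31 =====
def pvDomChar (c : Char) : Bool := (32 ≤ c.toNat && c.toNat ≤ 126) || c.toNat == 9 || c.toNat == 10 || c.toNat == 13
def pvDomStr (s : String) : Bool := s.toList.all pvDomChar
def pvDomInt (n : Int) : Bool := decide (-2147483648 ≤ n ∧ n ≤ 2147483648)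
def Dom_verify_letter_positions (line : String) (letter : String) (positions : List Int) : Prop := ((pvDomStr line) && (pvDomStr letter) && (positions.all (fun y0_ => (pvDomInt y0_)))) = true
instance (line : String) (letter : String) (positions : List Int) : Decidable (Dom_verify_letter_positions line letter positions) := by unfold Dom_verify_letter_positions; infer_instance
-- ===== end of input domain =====

-- B replaces A's early-return membership-testing scan with sort-then-compare:
-- the ascending occurrence-index list must equal sorted(positions) (objective: alternative).

-- ===== PORT A =====
-- the 'for position, char in enumerate(line)' loop with early return and running count
def vlpLoopA (letter : String) (positions : List Int) : List (Int × Char) → Int → Bool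
  | [], cnt => cnt == (positions.length : Int)
  | (pos, ch) :: rest, cnt =>
    if String.ofList [ch] == letter && !(positions.contains pos) then false
    else if String.ofList [ch] == letter then vlpLoopA letter positions rest (cnt + 1)
    else vlpLoopA letter positions rest cnt

def verify_letter_positions (line : String) (letter : String) (positions : List Int) : Bool :=
  vlpLoopA letter positions (PySem.List.enumerate line.toList 0) 0

-- ===== PORT B =====
-- occurrences = [i for i, c in enumerate(line) if c == letter]
def vlpOccList (line : String) (letter : String) : List Int :=
  (PySem.List.enumerate line.toList 0).filterMap
    (fun p => if String.ofList [p.2] == letter then some p.1 else none)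

-- return occurrences == sorted(positions)
def verify_letter_positions_alt (line : String) (letter : String) (positions : List Int) : Bool :=
  vlpOccList line letter == PySem.List.sorted positions (fun x => x) false

-- ===== PRECONDITION & SPEC =====
def Spec_verify_letter_positions (line : String) (letter : String) (positions : List Int) (out : Bool) : Prop := out = verify_letter_positions_alt line letter positions
instance (line : String) (letter : String) (positions : List Int) (out : Bool) : Decidable (Spec_verify_letter_positions line letter positions out) := by unfold Spec_verify_letter_positions; infer_instance

-- ===== CLAIM (what is proved, stated in full; the proofs are below) =====
def Claim_equal_verify_letter_positions : Prop := ∀ (line : String) (letter : String) (positions : List Int), Dom_verify_letter_positions line letter positions → Spec_verify_letter_positions line letter positions (verify_letter_positions line letter positions)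

-- ===== LEMMAS AND PROOFS =====

-- A's loop returns true iff every occurrence index is in positions and the
-- carried count plus the number of remaining occurrences equals len(positions).
theorem vlpLoopA_char (letter : String) (positions : List Int) (l : List (Int × Char)) (cnt : Int) :
    vlpLoopA letter positions l cnt = true ↔
      ((∀ p ∈ l, String.ofList [p.2] = letter → p.1 ∈ positions) ∧
        cnt + ((l.filterMap (fun p => if String.ofList [p.2] == letter then some p.1 else none)).length : Int)
          = (positions.length : Int)) := by
  induction l generalizing cnt with
  | nil => simp [vlpLoopA]
  | cons p rest ih =>
    obtain ⟨pos, ch⟩ := p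
    by_cases hc : String.ofList [ch] = letter
    · by_cases hm : pos ∈ positions
      · simp [vlpLoopA, hc, hm, ih]
        intro _
        omega
      · simp [vlpLoopA, hc, hm]
    · simp [vlpLoopA, hc, ih]

-- the occurrence-index list is strictly increasing (enumerate indices are)
theorem vlpOccList_pairwise (line : String) (letter : String) :
    (vlpOccList line letter).Pairwise (· < ·) := by
  have h := PySem.List.pairwise_lt_enumerate (xs := line.toList) (s := 0)
  refine List.Pairwise.filterMap _ (fun a b hab x hx y hy => ?_) h
  split at hx <;> split at hy <;> simp_all

theorem vlpOccList_mem (line : String) (letter : String) (x : Int) :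
    x ∈ vlpOccList line letter ↔
      ∃ p ∈ PySem.List.enumerate line.toList 0, String.ofList [p.2] = letter ∧ p.1 = x := by
  unfold vlpOccList
  simp only [List.mem_filterMap]
  constructor
  · rintro ⟨p, hp, hf⟩
    refine ⟨p, hp, ?_⟩
    split at hf <;> simp_all
  · rintro ⟨p, hp, hc, hx⟩
    exact ⟨p, hp, by simp [hc, hx]⟩

theorem verify_letter_positions_spec' (line : String) (letter : String) (positions : List Int) :
    verify_letter_positions line letter positions = verify_letter_positions_alt line letter positions := by
  rw [Bool.eq_iff_iff, verify_letter_positions, verify_letter_positions_alt, vlpLoopA_char]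
  simp only [beq_iff_eq]
  have hpw := vlpOccList_pairwise line letter
  have hnd : (vlpOccList line letter).Nodup := hpw.imp Int.ne_of_lt
  constructor
  · rintro ⟨hsub, hcount⟩
    have hsub' : vlpOccList line letter ⊆ positions := by
      intro x hx
      rw [vlpOccList_mem] at hx
      obtain ⟨p, hp, hc, hx⟩ := hx
      exact hx ▸ hsub p hp hc
    have hlen' : (vlpOccList line letter).length = positions.length := by
      simp only [vlpOccList, beq_iff_eq]; omega
    have hperm : (vlpOccList line letter).Perm positions :=
      (hnd.subperm hsub').perm_of_length_le (le_of_eq hlen'.symm)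
    exact (PySem.List.sorted_eq_of_perm_of_pairwise_lt _ _ _ hperm hpw).symm
  · intro heq
    have hperm : (vlpOccList line letter).Perm positions := by
      rw [heq]; exact PySem.List.sorted_perm positions (fun x => x) false
    refine ⟨fun p hp hc => ?_, ?_⟩
    · exact hperm.subset ((vlpOccList_mem line letter p.1).2 ⟨p, hp, hc, rfl⟩)
    · have := hperm.length_eq
      simp only [vlpOccList, beq_iff_eq] at this; omega

-- ===== VERDICT (by name: the statement is the Claim_ definition above) =====
theorem verify_letter_positions_spec : Claim_equal_verify_letter_positions := by
  intro line letter positions _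
  exact verify_letter_positions_spec' line letter positions
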